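-- pv_equiv track=rewrite | github.com/jackd/deep-cloud | deep_cloud/models/very_dense/utils.py | pack_lower_triangle
-- ===== SOURCE A (Python) =====
-- def pack_lower_triangle(values):
--     """Pack flat list into lower triangular list of lists."""
--     N = len(values)
--     consumed = 0
--     out = []
--     i = 1
--     while consumed < N:
--         out.append(values[consumed:consumed + i])
--         consumed += i
--         i += 1
--     assert (consumed == N)
--     return out
-- ===== SOURCE B (Python) =====
-- def pack_lower_triangle(values):
--     """Pack flat list into lower triangular list of lists."""
--     N = len(values)
--     n = 0
--     while (n + 1) * (n + 2) // 2 <= N: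
--         n += 1
--     assert n * (n + 1) // 2 == N
--     return [values[i * (i - 1) // 2:i * (i + 1) // 2] for i in range(1, n + 1)]
-- ===== Notes on version B (the rewrite author's own statement) =====
-- stated objective: alternative
-- what changed: Replaces the running 'consumed' accumulator loop by first computing the number of rows n and then slicing each row at its closed-form triangular start index i*(i-1)//2.
import Mathlib
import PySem

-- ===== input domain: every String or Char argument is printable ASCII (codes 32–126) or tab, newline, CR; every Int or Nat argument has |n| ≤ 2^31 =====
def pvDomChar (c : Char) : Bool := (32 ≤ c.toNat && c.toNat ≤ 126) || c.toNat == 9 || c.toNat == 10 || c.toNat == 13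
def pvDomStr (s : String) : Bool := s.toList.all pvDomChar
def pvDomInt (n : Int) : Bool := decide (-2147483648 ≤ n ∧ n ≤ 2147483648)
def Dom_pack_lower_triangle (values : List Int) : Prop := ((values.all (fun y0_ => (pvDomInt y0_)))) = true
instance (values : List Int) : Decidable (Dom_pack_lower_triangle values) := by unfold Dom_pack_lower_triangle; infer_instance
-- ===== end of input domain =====

-- B replaces A's running 'consumed' accumulator by computing the row count n first
-- and slicing each row at its closed-form triangular start index (objective: alternative).

-- ===== PORT A =====
-- A's while loop: state (consumed, i); here i = k + 1 so the loop variable stays positive.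
def packA_go (values : List Int) (N consumed k : Nat) : List (List Int) :=
  if consumed < N then
    PySem.List.slice values (some (consumed : Int)) (some ((consumed : Int) + ((k + 1 : Nat) : Int)))
      :: packA_go values N (consumed + (k + 1)) (k + 1)
  else []
termination_by N - consumed
decreasing_by omega

def pack_lower_triangle (values : List Int) : List (List Int) :=
  packA_go values values.length 0 0

-- ===== PORT B =====
-- B's while loop computing the number of rows n.
def packB_n (N n : Nat) : Nat :=
  if h : (n + 1) * (n + 2) / 2 ≤ N then packB_n N (n + 1) else n
termination_by N - n
decreasing_by
  have h2 : (n + 1) * 2 ≤ (n + 1) * (n + 2) := Nat.mul_le_mul_left _ (by omega)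
  have : n + 1 ≤ (n + 1) * (n + 2) / 2 := Nat.le_div_iff_mul_le (by omega) |>.mpr h2
  omega

-- range(1, n+1) is ported as List.range n with i = j + 1.
def pack_lower_triangle_alt (values : List Int) : List (List Int) :=
  (List.range (packB_n values.length 0)).map (fun j =>
    PySem.List.slice values (some (((j + 1) * j / 2 : Nat) : Int)) (some ((((j + 1) * (j + 2) / 2 : Nat) : Int))))

-- ===== PRECONDITION & SPEC =====
-- Pre_ excludes exactly the non-triangular lengths, on which A's assert raises AssertionError.
def Pre_pack_lower_triangle (values : List Int) : Prop :=
  ∃ n, n < values.length + 1 ∧ 2 * values.length = n * (n + 1)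
instance (values : List Int) : Decidable (Pre_pack_lower_triangle values) := by
  unfold Pre_pack_lower_triangle; infer_instance

def pvWitness_pack_lower_triangle : List Int := [1, 2, 3, 4, 5, 6]

def Spec_pack_lower_triangle (values : List Int) (out : List (List Int)) : Prop := out = pack_lower_triangle_alt values
instance (values : List Int) (out : List (List Int)) : Decidable (Spec_pack_lower_triangle values out) := by unfold Spec_pack_lower_triangle; infer_instance

-- ===== CLAIM (what is proved, stated in full; the proofs are below) =====
def Claim_equal_pack_lower_triangle : Prop := ∀ (values : List Int), Dom_pack_lower_triangle values → Pre_pack_lower_triangle values → Spec_pack_lower_triangle values (pack_lower_triangle values)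

-- ===== LEMMAS AND PROOFS =====

-- triangular numbers
def pvT (k : Nat) : Nat := k * (k + 1) / 2

lemma pvT_double (k : Nat) : 2 * pvT k = k * (k + 1) := by
  unfold pvT
  rcases Nat.even_mul_succ_self k with ⟨m, hm⟩
  omega

lemma pvT_succ (k : Nat) : pvT (k + 1) = pvT k + (k + 1) := by
  have h1 := pvT_double k
  have h2 := pvT_double (k + 1)
  have h3 : (k + 1) * (k + 1 + 1) = k * (k + 1) + 2 * (k + 1) := by ring
  omega

lemma pvT_mono {a b : Nat} (h : a ≤ b) : pvT a ≤ pvT b :=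
  Nat.div_le_div_right (Nat.mul_le_mul h (by omega))

lemma packB_n_eq (m : Nat) : ∀ d n, n + d = m → packB_n (pvT m) n = m := by
  intro d
  induction d with
  | zero =>
    intro n hn
    have hn' : n = m := by omega
    subst hn'
    rw [packB_n]
    have hgt : pvT n < pvT (n + 1) := by have := pvT_succ n; omega
    have hcond : ¬ ((n + 1) * (n + 2) / 2 ≤ pvT n) := by
      show ¬ (pvT (n + 1) ≤ pvT n); omega
    simp [hcond]
  | succ d ih =>
    intro n hn
    rw [packB_n]
    have hle : pvT (n + 1) ≤ pvT m := pvT_mono (by omega)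
    have hcond : (n + 1) * (n + 2) / 2 ≤ pvT m := hle
    simp only [hcond, dif_pos]
    exact ih (n + 1) (by omega)

lemma packA_go_eq (values : List Int) (m : Nat) (hlen : values.length = pvT m) :
    ∀ d k, k + d = m →
      packA_go values (pvT m) (pvT k) k =
        (List.range d).map (fun j =>
          PySem.List.slice values (some ((pvT (k + j) : Nat) : Int)) (some ((pvT (k + j + 1) : Nat) : Int))) := by
  intro d
  induction d with
  | zero =>
    intro k hk
    have hk' : k = m := by omega
    subst hk'
    rw [packA_go]
    simp
  | succ d ih =>
    intro k hk
    have hlt : pvT k < pvT m := by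
      have h1 : pvT (k + 1) ≤ pvT m := pvT_mono (by omega)
      have := pvT_succ k; omega
    rw [packA_go]
    simp only [hlt, if_pos]
    rw [show pvT k + (k + 1) = pvT (k + 1) from (pvT_succ k).symm]
    rw [ih (k + 1) (by omega)]
    rw [List.range_succ_eq_map, List.map_cons, List.map_map]
    refine List.cons_eq_cons.mpr ⟨?_, ?_⟩
    · have hcast : ((pvT k : Nat) : Int) + (((k + 1 : Nat) : Nat) : Int) = ((pvT (k + 1) : Nat) : Int) := by
        have := pvT_succ k; omega
      simp only [Nat.add_zero, hcast]
    · apply List.map_congr_left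
      intro j _
      simp only [Function.comp]
      rw [show k + 1 + j = k + (j + 1) from by omega]

theorem pack_lower_triangle_spec_aux (values : List Int)
    (hpre : Pre_pack_lower_triangle values) :
    pack_lower_triangle values = pack_lower_triangle_alt values := by
  obtain ⟨m, hm, heq⟩ := hpre
  have hlen : values.length = pvT m := by have := pvT_double m; omega
  unfold pack_lower_triangle pack_lower_triangle_alt
  rw [hlen]
  rw [packB_n_eq m m 0 (by omega)]
  have h := packA_go_eq values m hlen m 0 (by omega)
  rw [show pvT 0 = 0 from rfl] at h
  rw [h]
  apply List.map_congr_left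
  intro j _
  have h1 : pvT (0 + j) = (j + 1) * j / 2 := by simp [pvT, Nat.mul_comm]
  have h2 : pvT (0 + j + 1) = (j + 1) * (j + 2) / 2 := by simp [pvT]
  rw [h1, h2]

-- ===== VERDICT (by name: the statement is the Claim_ definition above) =====
theorem pack_lower_triangle_spec : Claim_equal_pack_lower_triangle := by
  intro values _ hpre
  exact pack_lower_triangle_spec_aux values hpre
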